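-- pv_equiv track=rewrite | github.com/syhAnna/ArtifitialIntelligent384 | a3/CSC384_A3/check_frequency.py | check_pivot
-- ===== SOURCE A (Python) =====
-- def check_pivot(l, frequency):
--     """
--     l is list of 0 and 1
--     len(l) >= frequency
--     """
--     # find the index of the first 1
--     pivot = len(l)
--     for i in range(len(l)):
--         if l[i] == 1:
--             pivot = i
--             break
--     if pivot >= frequency:
--         return False
--     while pivot < len(l) - 3:
--         flag = 0
--         for i in range(pivot+1, pivot+4):
--             if l[i] == 1:
--                 flag = 1
--                 pivot = i
--         if flag == 0:
--             return False
--     return True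
-- ===== SOURCE B (Python) =====
-- def check_pivot(l, frequency):
--     # first index holding a 1 (len(l) if none)
--     first = next((i for i, x in enumerate(l) if x == 1), len(l))
--     if first >= frequency:
--         return False
--     # stateless scan: a 1 with no 1 in the next three positions breaks the chain
--     return not any(l[i] == 1 and l[i+1] != 1 and l[i+2] != 1 and l[i+3] != 1
--                    for i in range(len(l) - 3))
-- ===== Notes on version B (the rewrite author's own statement) =====
-- stated objective: simpler
-- what changed: Replaces the mutating greedy pivot walk (inner 3-element for-loop updating pivot to the last 1 seen, with a flag) by a single stateless scan that checks the local pattern 'a 1 followed by three non-1s' at every position; the first-1 guard becomes a one-line next(enumerate).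
import Mathlib
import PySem

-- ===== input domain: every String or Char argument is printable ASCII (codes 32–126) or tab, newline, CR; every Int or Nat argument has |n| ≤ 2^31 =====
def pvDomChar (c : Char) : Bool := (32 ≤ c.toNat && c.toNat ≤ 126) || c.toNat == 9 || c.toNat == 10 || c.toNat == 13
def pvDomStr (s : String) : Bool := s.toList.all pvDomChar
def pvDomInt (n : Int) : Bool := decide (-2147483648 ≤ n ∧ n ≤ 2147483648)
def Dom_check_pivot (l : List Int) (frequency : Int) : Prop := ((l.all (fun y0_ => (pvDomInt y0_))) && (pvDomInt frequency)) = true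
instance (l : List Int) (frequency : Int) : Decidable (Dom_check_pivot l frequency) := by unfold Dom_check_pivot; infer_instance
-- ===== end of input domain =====

-- B replaces A's mutating greedy pivot walk by a stateless local-pattern scan
-- ('a 1 with no 1 in the next three positions'); objective: simpler.


-- ===== PORT A =====
-- 'for i in range(len(l)): if l[i] == 1: pivot = i; break' (pivot = len(l) if no 1),
-- walked element by element with the running index i; same values, same order.
def check_pivot_findA : List Int → Nat → Nat
  | [], i => i
  | x :: rest, i => if x = 1 then i else check_pivot_findA rest (i + 1)

-- inner 'for i in range(pivot+1, pivot+4)' updating the (flag, pivot) state.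
-- Indices are always in range in A's executions, so l.getD i 0 is exactly Python's l[i].
def check_pivot_inner (l : List Int) : List Nat → Nat × Nat → Nat × Nat
  | [], st => st
  | i :: rest, st =>
      check_pivot_inner l rest (if l.getD i 0 = 1 then (1, i) else st)

def check_pivot_step (l : List Int) (pivot : Nat) : Nat × Nat :=
  check_pivot_inner l (List.range' (pivot + 1) 3) (0, pivot)

-- 'while pivot < len(l) - 3: …'  (Nat subtraction agrees with Python since pivot ≥ 0).
-- The fuel argument only makes the recursion structural: it starts at len(l)+1 and is
-- proved never to run out (the pivot strictly increases), so the loop is exactly Python's.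
def check_pivot_while (l : List Int) : Nat → Nat → Bool
  | 0, _ => true
  | fuel + 1, pivot =>
    if pivot < l.length - 3 then
      if (check_pivot_step l pivot).1 = 0 then false
      else check_pivot_while l fuel (check_pivot_step l pivot).2
    else true

def check_pivot (l : List Int) (frequency : Int) : Bool :=
  let pivot := check_pivot_findA l 0
  if (pivot : Int) ≥ frequency then false
  else check_pivot_while l (l.length + 1) pivot

-- ===== PORT B =====
-- next((i for i, x in enumerate(l) if x == 1), len(l))
def check_pivot_alt_first (l : List Int) : Int :=
  match (PySem.List.enumerate l).find? (fun ix => ix.2 == 1) with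
  | some ix => ix.1
  | none => (l.length : Int)

def check_pivot_alt (l : List Int) (frequency : Int) : Bool :=
  if check_pivot_alt_first l ≥ frequency then false
  else
    -- indices i, i+1, i+2, i+3 are always < len(l), so getD is exactly Python's l[_]
    !((List.range (l.length - 3)).any (fun i =>
        l.getD i 0 == 1 && l.getD (i + 1) 0 != 1 &&
        l.getD (i + 2) 0 != 1 && l.getD (i + 3) 0 != 1))

-- ===== PRECONDITION & SPEC =====
def Spec_check_pivot (l : List Int) (frequency : Int) (out : Bool) : Prop := out = check_pivot_alt l frequency
instance (l : List Int) (frequency : Int) (out : Bool) : Decidable (Spec_check_pivot l frequency out) := by unfold Spec_check_pivot; infer_instance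

-- ===== CLAIM (what is proved, stated in full; the proofs are below) =====
def Claim_equal_check_pivot : Prop := ∀ (l : List Int) (frequency : Int), Dom_check_pivot l frequency → Spec_check_pivot l frequency (check_pivot l frequency)

-- ===== LEMMAS AND PROOFS =====

-- 'no breaking pattern (a 1 with no 1 in the next three positions) at or after position p'
def pvGoodFrom (l : List Int) (p : Nat) : Prop :=
  ∀ i, p ≤ i → i + 3 < l.length →
    ¬(l.getD i 0 = 1 ∧ l.getD (i + 1) 0 ≠ 1 ∧ l.getD (i + 2) 0 ≠ 1 ∧ l.getD (i + 3) 0 ≠ 1)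

theorem pv_getD_eq (l : List Int) (k : Nat) (hk : k < l.length) : l.getD k 0 = l[k] := by
  simp [List.getD_eq_getElem?_getD, List.getElem?_eq_getElem hk]

-- characterisation of A's inner for-loop
theorem check_pivot_inner_spec (l : List Int) (xs : List Nat) (st : Nat × Nat)
    (hpw : List.Pairwise (· < ·) xs) :
    (check_pivot_inner l xs st = st ∨
      ((check_pivot_inner l xs st).1 = 1 ∧ (check_pivot_inner l xs st).2 ∈ xs ∧
        l.getD (check_pivot_inner l xs st).2 0 = 1)) ∧
    (∀ j ∈ xs, (check_pivot_inner l xs st).2 < j → l.getD j 0 ≠ 1) ∧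
    ((check_pivot_inner l xs st).1 = 0 →
      check_pivot_inner l xs st = st ∧ ∀ i ∈ xs, l.getD i 0 ≠ 1) := by
  induction xs generalizing st with
  | nil => simp [check_pivot_inner]
  | cons i rest ih =>
    have hpw' : List.Pairwise (· < ·) rest := hpw.tail
    by_cases hi : l.getD i 0 = 1
    · have h := ih (st := (1, i)) hpw'
      simp only [check_pivot_inner, hi, if_pos]
      obtain ⟨h1, h2, h3⟩ := h
      refine ⟨?_, ?_, ?_⟩
      · rcases h1 with h1 | h1
        · exact Or.inr ⟨by rw [h1], by simp [h1], by rw [h1]; exact hi⟩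
        · exact Or.inr ⟨h1.1, List.mem_cons_of_mem _ h1.2.1, h1.2.2⟩
      · intro j hj hlt
        rcases List.mem_cons.mp hj with rfl | hj
        · -- result.2 is i or an element of rest (all > i), so result.2 < i is impossible
          exfalso
          rcases h1 with h1 | h1
          · simp [h1] at hlt
          · have := (List.pairwise_cons.mp hpw).1 _ h1.2.1
            omega
        · exact h2 j hj hlt
      · intro h0
        rcases h1 with h1 | h1
        · simp [h1] at h0
        · omega
    · have h := ih (st := st) hpw'
      simp only [check_pivot_inner, hi, if_false]
      obtain ⟨h1, h2, h3⟩ := h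
      refine ⟨?_, ?_, ?_⟩
      · rcases h1 with h1 | h1
        · exact Or.inl h1
        · exact Or.inr ⟨h1.1, List.mem_cons_of_mem _ h1.2.1, h1.2.2⟩
      · intro j hj hlt
        rcases List.mem_cons.mp hj with rfl | hj
        · exact hi
        · exact h2 j hj hlt
      · intro h0
        obtain ⟨he, hall⟩ := h3 h0
        exact ⟨he, by intro j hj; rcases List.mem_cons.mp hj with rfl | hj; exact hi; exact hall j hj⟩

theorem check_pivot_findA_shift (xs : List Int) : ∀ i : Nat,
    check_pivot_findA xs i = i + check_pivot_findA xs 0 := by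
  induction xs with
  | nil => intro i; simp [check_pivot_findA]
  | cons x rest ih =>
    intro i
    by_cases hx : x = 1
    · simp [check_pivot_findA, hx]
    · simp only [check_pivot_findA, hx, if_false]
      rw [ih (i + 1), ih 1]
      omega

theorem check_pivot_findA_spec (l : List Int) :
    check_pivot_findA l 0 ≤ l.length ∧
    (check_pivot_findA l 0 = l.length ∨ l.getD (check_pivot_findA l 0) 0 = 1) ∧
    (∀ j, j < check_pivot_findA l 0 → l.getD j 0 ≠ 1) := by
  induction l with
  | nil => simp [check_pivot_findA]
  | cons x rest ih =>
    by_cases hx : x = 1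
    · refine ⟨by simp [check_pivot_findA, hx], Or.inr (by simp [check_pivot_findA, hx]), ?_⟩
      intro j hj
      simp [check_pivot_findA, hx] at hj
    · obtain ⟨ha, hb, hc⟩ := ih
      have hshift : check_pivot_findA (x :: rest) 0 = 1 + check_pivot_findA rest 0 := by
        simp only [check_pivot_findA, hx, if_false]
        exact check_pivot_findA_shift rest 1
      refine ⟨?_, ?_, ?_⟩
      · rw [hshift]; simp; omega
      · rw [hshift]
        rcases hb with h | h
        · exact Or.inl (by simp [h]; omega)
        · refine Or.inr ?_
          rw [show 1 + check_pivot_findA rest 0 = check_pivot_findA rest 0 + 1 by omega]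
          simpa [List.getD_cons_succ] using h
      · intro j hj
        rw [hshift] at hj
        match j with
        | 0 => simpa using hx
        | j' + 1 =>
          rw [List.getD_cons_succ]
          exact hc j' (by omega)

theorem check_pivot_alt_first_eq (l : List Int) :
    check_pivot_alt_first l = ((check_pivot_findA l 0 : Nat) : Int) := by
  obtain ⟨hplen, hpval, hpbef⟩ := check_pivot_findA_spec l
  unfold check_pivot_alt_first
  cases hf : (PySem.List.enumerate l).find? (fun ix => ix.2 == 1) with
  | none =>
    have hall := List.find?_eq_none.mp hf
    have hnone : ∀ k, k < l.length → l.getD k 0 ≠ 1 := by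
      intro k hk
      have hmem : ((0 + (k : Int), l[k]) : Int × Int) ∈ PySem.List.enumerate l 0 :=
        (PySem.List.mem_enumerate_iff l 0 _).mpr ⟨k, hk, rfl⟩
      have hnp := hall _ hmem
      simp only [beq_iff_eq] at hnp
      rw [pv_getD_eq l k hk]; exact hnp
    have hlen : check_pivot_findA l 0 = l.length := by
      rcases hpval with h | h
      · exact h
      · rcases Nat.lt_or_ge (check_pivot_findA l 0) l.length with hlt | hge
        · exact absurd h (hnone _ hlt)
        · omega
    simp [hlen]
  | some ix =>
    obtain ⟨hpred, k, hk, hget, hbef⟩ := List.find?_eq_some_iff_getElem.mp hf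
    rw [PySem.List.length_enumerate] at hk
    rw [PySem.List.getElem_enumerate] at hget
    subst hget
    simp only [beq_iff_eq] at hpred
    have hk1 : l.getD k 0 = 1 := by rw [pv_getD_eq l k hk]; exact hpred
    have hbef' : ∀ j, j < k → l.getD j 0 ≠ 1 := by
      intro j hj
      have hb := hbef j hj
      rw [PySem.List.getElem_enumerate] at hb
      simp only [Bool.not_eq_eq_eq_not, Bool.not_true, beq_eq_false_iff_ne] at hb
      rw [pv_getD_eq l j (by omega : j < l.length)]; exact hb
    have hkp : k = check_pivot_findA l 0 := by
      rcases lt_trichotomy k (check_pivot_findA l 0) with hlt | heq | hgt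
      · exact absurd hk1 (hpbef k hlt)
      · exact heq
      · exfalso
        have hplt : check_pivot_findA l 0 < l.length := by omega
        rcases hpval with h | h
        · omega
        · exact (hbef' _ hgt) h
    simp [hkp]

theorem check_pivot_while_spec (l : List Int) : ∀ (f p : Nat), l.length ≤ f + p →
    (l.length ≤ p ∨ l.getD p 0 = 1) → (check_pivot_while l f p = true ↔ pvGoodFrom l p) := by
  intro f
  induction f with
  | zero =>
    intro p hf hp
    refine iff_of_true rfl ?_
    intro i hpi hilen hpat
    omega
  | succ f ih =>
    intro p hf hp
    simp only [check_pivot_while]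
    by_cases h : p < l.length - 3
    · rw [if_pos h]
      by_cases hz : (check_pivot_step l p).1 = 0
      · rw [if_pos hz]
        have hs := check_pivot_inner_spec l (List.range' (p + 1) 3) (0, p)
          (List.pairwise_lt_range' ..)
        unfold check_pivot_step at hz
        obtain ⟨hres, hall⟩ := hs.2.2 hz
        have hp1 : l.getD p 0 = 1 := by
          rcases hp with h' | h'
          · omega
          · exact h'
        refine iff_of_false (by simp) ?_
        intro hg
        have hw1 : l.getD (p + 1) 0 ≠ 1 := hall _ (List.mem_range'_1.mpr (by omega))
        have hw2 : l.getD (p + 2) 0 ≠ 1 := hall _ (List.mem_range'_1.mpr (by omega))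
        have hw3 : l.getD (p + 3) 0 ≠ 1 := hall _ (List.mem_range'_1.mpr (by omega))
        exact hg p le_rfl (by omega) ⟨hp1, hw1, hw2, hw3⟩
      · rw [if_neg hz]
        have hs := check_pivot_inner_spec l (List.range' (p + 1) 3) (0, p)
          (List.pairwise_lt_range' ..)
        have hq : (check_pivot_step l p).2 ∈ List.range' (p + 1) 3 ∧
            l.getD (check_pivot_step l p).2 0 = 1 := by
          rcases hs.1 with h1 | h1
          · exact absurd (by simp [check_pivot_step, h1]) hz
          · exact ⟨h1.2.1, h1.2.2⟩
        have hqm := List.mem_range'_1.mp hq.1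
        rw [ih _ (by omega) (Or.inr hq.2)]
        constructor
        · intro hg i hpi hilen hpat
          obtain ⟨h1, h2, h3, h4⟩ := hpat
          rcases Nat.lt_or_ge i (check_pivot_step l p).2 with hlt | hge
          · have hq3 : (check_pivot_step l p).2 = i + 1 ∨ (check_pivot_step l p).2 = i + 2 ∨
                (check_pivot_step l p).2 = i + 3 := by omega
            have hq2 := hq.2
            rcases hq3 with hq' | hq' | hq'
            · rw [hq'] at hq2; exact h2 hq2
            · rw [hq'] at hq2; exact h3 hq2
            · rw [hq'] at hq2; exact h4 hq2
          · exact hg i hge hilen ⟨h1, h2, h3, h4⟩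
        · intro hg i hqi hilen hpat
          exact hg i (by omega) hilen hpat
    · rw [if_neg h]
      refine iff_of_true rfl ?_
      intro i hpi hilen hpat
      omega

-- ===== VERDICT (by name: the statement is the Claim_ definition above) =====
theorem check_pivot_spec : Claim_equal_check_pivot := by
  unfold Claim_equal_check_pivot
  intro l f _
  unfold Spec_check_pivot
  obtain ⟨hplen, hpval, hpbef⟩ := check_pivot_findA_spec l
  simp only [check_pivot, check_pivot_alt, check_pivot_alt_first_eq]
  by_cases hge : ((check_pivot_findA l 0 : Nat) : Int) ≥ f
  · rw [if_pos hge, if_pos hge]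
  · rw [if_neg hge, if_neg hge]
    set p := check_pivot_findA l 0 with hpdef
    have hp : l.length ≤ p ∨ l.getD p 0 = 1 := by
      rcases hpval with h' | h'
      · exact Or.inl (le_of_eq h'.symm)
      · exact Or.inr h'
    have hw := check_pivot_while_spec l (l.length + 1) p (by omega) hp
    have hany : ((List.range (l.length - 3)).any (fun i =>
        l.getD i 0 == 1 && l.getD (i + 1) 0 != 1 &&
        l.getD (i + 2) 0 != 1 && l.getD (i + 3) 0 != 1)) = false ↔ pvGoodFrom l 0 := by
      rw [List.any_eq_false]
      constructor
      · intro hall i _ hilen hpat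
        have hni := hall i (List.mem_range.mpr (by omega))
        simp only [Bool.and_eq_true, beq_iff_eq, bne_iff_ne, not_and] at hni
        exact hni ⟨⟨hpat.1, hpat.2.1⟩, hpat.2.2.1⟩ hpat.2.2.2
      · intro hg i hmem
        rw [List.mem_range] at hmem
        simp only [Bool.and_eq_true, beq_iff_eq, bne_iff_ne, not_and]
        intro hc hd
        exact hg i (Nat.zero_le _) (by omega) ⟨hc.1.1, hc.1.2, hc.2, hd⟩
    have h0p : pvGoodFrom l 0 ↔ pvGoodFrom l p := by
      constructor
      · intro hg i hpi hilen
        exact hg i (Nat.zero_le _) hilen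
      · intro hg i _ hilen hpat
        rcases Nat.lt_or_ge i p with hlt | hge'
        · exact (hpbef i hlt) hpat.1
        · exact hg i hge' hilen hpat
    cases hb : ((List.range (l.length - 3)).any (fun i =>
        l.getD i 0 == 1 && l.getD (i + 1) 0 != 1 &&
        l.getD (i + 2) 0 != 1 && l.getD (i + 3) 0 != 1)) with
    | false =>
      have ht := hw.mpr (h0p.mp (hany.mp hb))
      rw [ht]
      decide
    | true =>
      have hng : ¬ pvGoodFrom l 0 := fun hg => by
        rw [← hany] at hg
        rw [hg] at hb
        exact Bool.false_ne_true hb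
      have hf : check_pivot_while l (l.length + 1) p = false :=
        Bool.eq_false_iff.mpr (fun ht => hng (h0p.mpr (hw.mp ht)))
      rw [hf]
      decide
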